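-- pv_equiv track=rewrite | github.com/HassiaT/P_Projects | Python/COTASKS/Necklace/SOLUTIONS/beads.py | collecting_beads_counting
-- ===== SOURCE A (Python) =====
-- def collecting_beads_counting(necklace):
--     BLUE = False
--     RED = False
--     count = 0
--     for bead in necklace:
--         if bead == 'r':
--             if BLUE:
--                 break
--             else:
--                 RED = True
--         if bead == 'b':
--             if RED:
--                 break
--             else:
--                 BLUE = True
--         count+= 1
--     return count
-- ===== SOURCE B (Python) =====
-- def collecting_beads_counting(necklace):
--     first_r = None
--     first_b = None
--     for i, bead in enumerate(necklace):
--         if first_r is None and bead == 'r':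
--             first_r = i
--         if first_b is None and bead == 'b':
--             first_b = i
--     if first_r is None or first_b is None:
--         return len(necklace)
--     return max(first_r, first_b)
-- ===== Notes on version B (the rewrite author's own statement) =====
-- stated objective: alternative
-- what changed: Replaces the early-breaking two-flag state machine by a first-occurrence-index pass: record the first index of 'r' and of 'b', then return len(necklace) if a color is absent, else max of the two indices.
import Mathlib
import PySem

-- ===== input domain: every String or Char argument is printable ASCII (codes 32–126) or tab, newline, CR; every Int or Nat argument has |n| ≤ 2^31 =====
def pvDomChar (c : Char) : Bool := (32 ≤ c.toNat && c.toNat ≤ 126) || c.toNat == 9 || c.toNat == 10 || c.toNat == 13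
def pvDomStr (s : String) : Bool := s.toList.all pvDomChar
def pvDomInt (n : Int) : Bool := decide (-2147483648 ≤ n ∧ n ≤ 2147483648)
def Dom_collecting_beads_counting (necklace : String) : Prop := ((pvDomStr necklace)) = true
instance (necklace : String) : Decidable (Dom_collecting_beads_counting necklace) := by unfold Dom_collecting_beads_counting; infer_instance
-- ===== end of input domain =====

-- ===== PORT A =====
-- B replaces A's early-breaking two-flag state machine by a single first-occurrence-index pass plus arithmetic (alternative decomposition, same cost).
def bcAuxA : List Char → Bool → Bool → Int → Int
  | [], _BLUE, _RED, count => count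
  | bead :: rest, BLUE, RED, count =>
    if bead = 'r' then
      if BLUE then count
      else bcAuxA rest BLUE true (count + 1)
    else if bead = 'b' then
      if RED then count
      else bcAuxA rest true RED (count + 1)
    else bcAuxA rest BLUE RED (count + 1)

def collecting_beads_counting (necklace : String) : Int :=
  bcAuxA necklace.toList false false 0

-- ===== PORT B =====
def bcFirsts : List Char → Int → Option Int × Option Int → Option Int × Option Int
  | [], _i, st => st
  | bead :: rest, i, (fr, fb) =>
    let fr' := if fr = none ∧ bead = 'r' then some i else fr
    let fb' := if fb = none ∧ bead = 'b' then some i else fb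
    bcFirsts rest (i + 1) (fr', fb')

def collecting_beads_counting_alt (necklace : String) : Int :=
  match bcFirsts necklace.toList 0 (none, none) with
  | (some a, some b) => max a b
  | (_, _) => (necklace.toList.length : Int)

-- ===== PRECONDITION & SPEC =====
def Spec_collecting_beads_counting (necklace : String) (out : Int) : Prop := out = collecting_beads_counting_alt necklace
instance (necklace : String) (out : Int) : Decidable (Spec_collecting_beads_counting necklace out) := by unfold Spec_collecting_beads_counting; infer_instance

-- ===== CLAIM (what is proved, stated in full; the proofs are below) =====
def Claim_equal_collecting_beads_counting : Prop := ∀ (necklace : String), Dom_collecting_beads_counting necklace → Spec_collecting_beads_counting necklace (collecting_beads_counting necklace)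

-- ===== LEMMAS AND PROOFS =====

theorem bcFirsts_stable (xs : List Char) (i a b : Int) :
    bcFirsts xs i (some a, some b) = (some a, some b) := by
  induction xs generalizing i with
  | nil => rfl
  | cons x rest ih => simp [bcFirsts, ih]

theorem bc_key (xs : List Char) : ∀ (fr fb : Option Int) (k : Int),
    (∀ a, fr = some a → a < k) → (∀ b, fb = some b → b < k) →
    ¬(fr.isSome ∧ fb.isSome) →
    bcAuxA xs fb.isSome fr.isSome k =
      (match bcFirsts xs k (fr, fb) with
       | (some a, some b) => max a b
       | (_, _) => k + (xs.length : Int)) := by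
  induction xs with
  | nil =>
    intro fr fb k _ _ hnb
    match fr, fb with
    | none, none => simp [bcAuxA, bcFirsts]
    | some a, none => simp [bcAuxA, bcFirsts]
    | none, some b => simp [bcAuxA, bcFirsts]
    | some a, some b => exact absurd ⟨rfl, rfl⟩ hnb
  | cons x rest ih =>
    intro fr fb k hfr hfb hnb
    by_cases hr : x = 'r'
    · match fb with
      | some j =>
        have hfrn : fr = none := by
          cases fr with
          | none => rfl
          | some a => exact absurd ⟨rfl, rfl⟩ hnb
        subst hfrn
        have hj : j < k := hfb j rfl
        simp [bcAuxA, hr, bcFirsts, bcFirsts_stable]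
        omega
      | none =>
        match fr with
        | none =>
          have := ih (some k) none (k + 1)
            (by intro a ha; injection ha with h; omega)
            (by intro b hb; cases hb)
            (by simp)
          simp [bcAuxA, hr, bcFirsts] at this ⊢
          rw [this]; cases bcFirsts rest (k+1) (some k, none) with
          | mk o1 o2 => cases o1 <;> cases o2 <;> simp <;> ring
        | some a =>
          have := ih (some a) none (k + 1)
            (by intro a' ha; injection ha with h; have := hfr a rfl; omega)
            (by intro b hb; cases hb)
            (by simp)
          simp [bcAuxA, hr, bcFirsts] at this ⊢
          rw [this]; cases bcFirsts rest (k+1) (some a, none) with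
          | mk o1 o2 => cases o1 <;> cases o2 <;> simp <;> ring
    · by_cases hb : x = 'b'
      · match fr with
        | some j =>
          have hfbn : fb = none := by
            cases fb with
            | none => rfl
            | some b => exact absurd ⟨rfl, rfl⟩ hnb
          subst hfbn
          have hj : j < k := hfr j rfl
          simp [bcAuxA, hb, bcFirsts, bcFirsts_stable]
          omega
        | none =>
          match fb with
          | none =>
            have := ih none (some k) (k + 1)
              (by intro a ha; cases ha)
              (by intro b hb'; injection hb' with h; omega)
              (by simp)
            simp [bcAuxA, hb, bcFirsts] at this ⊢
            rw [this]; cases bcFirsts rest (k+1) (none, some k) with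
            | mk o1 o2 => cases o1 <;> cases o2 <;> simp <;> ring
          | some b' =>
            have := ih none (some b') (k + 1)
              (by intro a ha; cases ha)
              (by intro b hb'; injection hb' with h; have := hfb b' rfl; omega)
              (by simp)
            simp [bcAuxA, hb, bcFirsts] at this ⊢
            rw [this]; cases bcFirsts rest (k+1) (none, some b') with
            | mk o1 o2 => cases o1 <;> cases o2 <;> simp <;> ring
      · have := ih fr fb (k + 1)
          (by intro a ha; have := hfr a ha; omega)
          (by intro b hb'; have := hfb b hb'; omega)
          hnb
        simp [bcAuxA, hr, hb, bcFirsts] at this ⊢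
        rw [this]; cases bcFirsts rest (k+1) (fr, fb) with
        | mk o1 o2 => cases o1 <;> cases o2 <;> simp <;> ring

-- ===== VERDICT (by name: the statement is the Claim_ definition above) =====
theorem collecting_beads_counting_spec : Claim_equal_collecting_beads_counting := by
  intro necklace _
  unfold Spec_collecting_beads_counting collecting_beads_counting collecting_beads_counting_alt
  have := bc_key necklace.toList none none 0
    (by intro a ha; cases ha) (by intro b hb; cases hb) (by simp)
  simp at this
  rw [this]
  cases h : bcFirsts necklace.toList 0 (none, none) with
  | mk o1 o2 => cases o1 <;> cases o2 <;> simp
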